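-- pv_equiv track=rewrite | github.com/SimonRomanowski/Revelation | utils/int_utils.py | to_64x_string
-- ===== SOURCE A (Python) =====
-- def to_64x_string(value):
--     """Convert to a 0-padded 64 bit hexadecimal string."""
--     chars = []
--     for _ in range(16):
--         low_bits = value & 0xF
--         chars.insert(0, chr(48 + low_bits if low_bits < 10
--                             else 65 + low_bits - 10))
--         value = value >> 4
--     return "".join(chars)
-- ===== SOURCE B (Python) =====
-- def to_64x_string(value):
--     """Convert to a 0-padded 64 bit hexadecimal string."""
--     return "%016X" % (value & 0xFFFFFFFFFFFFFFFF)
-- ===== Notes on version B (the rewrite author's own statement) =====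
-- stated objective: idiomatic
-- what changed: Replaces the fixed-count per-nibble loop with character arithmetic by a single closed-form format call on the value masked to its low quadword.
import Mathlib
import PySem

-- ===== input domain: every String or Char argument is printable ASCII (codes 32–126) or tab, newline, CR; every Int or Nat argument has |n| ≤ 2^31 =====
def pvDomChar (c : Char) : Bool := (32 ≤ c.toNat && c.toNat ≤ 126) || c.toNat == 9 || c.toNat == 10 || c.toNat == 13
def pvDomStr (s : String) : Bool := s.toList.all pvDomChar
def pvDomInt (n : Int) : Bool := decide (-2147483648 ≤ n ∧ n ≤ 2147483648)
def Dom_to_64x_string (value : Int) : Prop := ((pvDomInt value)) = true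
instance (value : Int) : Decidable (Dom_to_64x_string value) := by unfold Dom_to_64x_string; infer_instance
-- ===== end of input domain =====

-- B replaces A's fixed-count per-nibble loop with one closed-form format call on the value
-- masked to its low quadword; same return value for every int.

-- ===== PORT A =====
-- chr(48 + low_bits if low_bits < 10 else 65 + low_bits - 10), with low_bits = value & 0xF
def pvAChar (w : Int) : Char :=
  let low_bits := PySem.Int.band w 15
  if low_bits < 10 then Char.ofNat (48 + low_bits).toNat
  else Char.ofNat (65 + low_bits - 10).toNat

-- one iteration of A's loop body: chars.insert(0, chr(...)); value = value >> 4
def pvAStep (st : List Char × Int) (_ : Nat) : List Char × Int :=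
  (pvAChar st.2 :: st.1, st.2 >>> (4:Nat))

def to_64x_string (value : Int) : String :=
  String.mk ((List.range 16).foldl pvAStep ([], value)).1

-- ===== PORT B =====
-- hand port of the builtin "%X" uppercase-hex formatting of a natural number
def pvHexDigit (n : Nat) : Char :=
  if n < 10 then Char.ofNat (48 + n) else Char.ofNat (55 + n)

def pvHexChars (n : Nat) : List Char :=
  if h : n = 0 then [] else pvHexChars (n / 16) ++ [pvHexDigit (n % 16)]
decreasing_by exact Nat.div_lt_self (Nat.pos_of_ne_zero h) (by norm_num)

-- "%016X" % (value & 0xFFFFFFFFFFFFFFFF): hex digits of the masked value, left-padded to 16 with '0'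
def to_64x_string_alt (value : Int) : String :=
  let m := (PySem.Int.band value 0xFFFFFFFFFFFFFFFF).toNat
  let ds := pvHexChars m
  String.mk (List.replicate (16 - ds.length) '0' ++ ds)

-- ===== PRECONDITION & SPEC =====
def Spec_to_64x_string (value : Int) (out : String) : Prop := out = to_64x_string_alt value
instance (value : Int) (out : String) : Decidable (Spec_to_64x_string value out) := by unfold Spec_to_64x_string; infer_instance

-- ===== CLAIM (what is proved, stated in full; the proofs are below) =====
def Claim_equal_to_64x_string : Prop := ∀ (value : Int), Dom_to_64x_string value → Spec_to_64x_string value (to_64x_string value)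

-- ===== LEMMAS AND PROOFS =====

theorem pv_band15 (a : Int) : PySem.Int.band a 15 = a % 16 := by
  unfold PySem.Int.band
  split_ifs with h h2 h3
  · have h1 : a.toNat &&& (15:Int).toNat = a.toNat % 16 := by
      have := Nat.and_two_pow_sub_one_eq_mod a.toNat 4
      norm_num at this ⊢
      exact this
    rw [h1]; omega
  · omega
  · have h1 : (15:Int).toNat &&& (-a - 1).toNat = (-a - 1).toNat % 16 := by
      have := Nat.and_two_pow_sub_one_eq_mod (-a - 1).toNat 4
      rw [Nat.and_comm]
      norm_num at this ⊢
      exact this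
    rw [h1]; omega
  · omega

theorem pv_band_mask (a : Int) :
    PySem.Int.band a 0xFFFFFFFFFFFFFFFF = a % 18446744073709551616 := by
  unfold PySem.Int.band
  split_ifs with h h2 h3
  · have h1 : a.toNat &&& (0xFFFFFFFFFFFFFFFF:Int).toNat = a.toNat % 18446744073709551616 := by
      have := Nat.and_two_pow_sub_one_eq_mod a.toNat 64
      norm_num at this ⊢
      exact this
    rw [h1]; omega
  · omega
  · have h1 : (0xFFFFFFFFFFFFFFFF:Int).toNat &&& (-a - 1).toNat
        = (-a - 1).toNat % 18446744073709551616 := by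
      have := Nat.and_two_pow_sub_one_eq_mod (-a - 1).toNat 64
      rw [Nat.and_comm]
      norm_num at this ⊢
      exact this
    rw [h1]; omega
  · omega

theorem pv_A_loop (k : Nat) (v : Int) (acc : List Char) :
    (List.range k).foldl pvAStep (acc, v)
      = ((List.range k).reverse.map (fun i : Nat => pvAChar (v >>> (4*i : Nat))) ++ acc, v >>> (4*k : Nat)) := by
  induction k with
  | zero => simp
  | succ k ih =>
    rw [List.range_succ, List.foldl_append, ih]
    simp only [List.foldl_cons, List.foldl_nil, pvAStep, List.reverse_append, List.reverse_cons,
      List.reverse_nil, List.nil_append, List.cons_append, List.map_cons, Prod.mk.injEq]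
    refine ⟨trivial, ?_⟩
    show (v >>> (4*k : Nat)) >>> (4:Nat) = v >>> (4*(k+1) : Nat)
    rw [show 4*(k+1) = 4*k + 4 from by ring, Int.shiftRight_add]

theorem pv_AChar_eq (w : Int) : pvAChar w = pvHexDigit ((w % 16).toNat) := by
  have h0 : 0 ≤ w % 16 := Int.emod_nonneg w (by norm_num)
  have h16 : w % 16 < 16 := Int.emod_lt_of_pos w (by norm_num)
  simp only [pvAChar, pvHexDigit, pv_band15]
  by_cases hlt : w % 16 < 10
  · rw [if_pos hlt, if_pos (show (w % 16).toNat < 10 by omega),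
      show (48 + w % 16).toNat = 48 + (w % 16).toNat from by omega]
  · rw [if_neg hlt, if_neg (show ¬ (w % 16).toNat < 10 by omega),
      show (65 + w % 16 - 10).toNat = 55 + (w % 16).toNat from by omega]

theorem pv_int_mod_div (v : Int) (i : Nat) (hi : i < 16) :
    v % 18446744073709551616 / 16^i % 16 = v / 16^i % 16 := by
  have hpow : ((16:Int)^i) ≠ 0 := by positivity
  have hN : (18446744073709551616:Int) = 16 ^ i * (16 ^ (15 - i) * 16) := by
    rw [show (16:Int)^i * (16^(15-i) * 16) = 16^(i + ((15 - i) + 1)) from by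
        rw [pow_add, pow_add, pow_one],
      show i + ((15 - i) + 1) = 16 from by omega]
    norm_num
  have h2 : v % 18446744073709551616
      = v + -(16 ^ (15 - i) * 16 * (v / 18446744073709551616)) * 16 ^ i := by
    calc v % 18446744073709551616
        = v - 18446744073709551616 * (v / 18446744073709551616) :=
          Int.emod_def v 18446744073709551616
      _ = v + -(16 ^ (15 - i) * 16 * (v / 18446744073709551616)) * 16 ^ i := by
          rw [hN]; ring
  rw [h2, Int.add_mul_ediv_right _ _ hpow,
    show v / 16^i + -(16 ^ (15 - i) * 16 * (v / 18446744073709551616))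
        = v / 16^i + 16 * -(16 ^ (15 - i) * (v / 18446744073709551616)) from by ring,
    Int.add_mul_emod_self_left]

theorem pv_hexDigit_zero : pvHexDigit 0 = '0' := by decide

theorem pv_map_zero_digits (k : Nat) :
    (List.range k).reverse.map (fun i => pvHexDigit (0 / 16^i % 16)) = List.replicate k '0' := by
  induction k with
  | zero => simp
  | succ k ih =>
    rw [List.range_succ]
    simp only [List.reverse_append, List.reverse_cons, List.reverse_nil, List.nil_append,
      List.cons_append, List.map_cons, ih, List.replicate_succ]
    rw [Nat.zero_div, Nat.zero_mod, pv_hexDigit_zero]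

theorem pv_rev_range_succ_map {α : Type} (f : Nat → α) (k : Nat) :
    (List.range (k+1)).reverse.map f
      = ((List.range k).reverse.map (fun i => f (i+1))) ++ [f 0] := by
  rw [List.range_succ_eq_map]
  simp [List.map_reverse, List.map_map, Function.comp_def]

theorem pv_hex_pad (k : Nat) (m : Nat) (h : m < 16^k) :
    List.replicate (k - (pvHexChars m).length) '0' ++ pvHexChars m
      = (List.range k).reverse.map (fun i => pvHexDigit (m / 16^i % 16)) := by
  induction k generalizing m with
  | zero =>
    have hm : m = 0 := by simpa using h
    subst hm
    rw [pvHexChars]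
    simp
  | succ k ih =>
    by_cases hm : m = 0
    · subst hm
      rw [pvHexChars]
      simpa using (pv_map_zero_digits (k+1)).symm
    · rw [pvHexChars]
      simp only [hm, dite_false]
      have hdiv : m / 16 < 16^k := by
        rw [Nat.div_lt_iff_lt_mul (by norm_num)]
        calc m < 16^(k+1) := h
          _ = 16^k * 16 := by rw [pow_succ]
      have ih' := ih (m / 16) hdiv
      rw [pv_rev_range_succ_map]
      have hlen : (k + 1) - (pvHexChars (m/16) ++ [pvHexDigit (m % 16)]).length
          = k - (pvHexChars (m/16)).length := by
        simp [List.length_append]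
      rw [hlen, ← List.append_assoc, ih']
      congr 1
      · apply List.map_congr_left
        intro i _
        congr 2
        rw [Nat.div_div_eq_div_mul, pow_succ']
      · simp

theorem pv_m_digit (value : Int) (i : Nat) (hi : i < 16) :
    (PySem.Int.band value 0xFFFFFFFFFFFFFFFF).toNat / 16^i % 16 = (value / 16^i % 16).toNat := by
  set m := (PySem.Int.band value 0xFFFFFFFFFFFFFFFF).toNat with hm
  have hb : (m : Int) = value % 18446744073709551616 := by
    rw [hm, pv_band_mask]
    exact Int.toNat_of_nonneg (Int.emod_nonneg value (by norm_num))
  have hI : ((m / 16^i % 16 : Nat) : Int) = value / 16^i % 16 := by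
    push_cast
    rw [hb]
    exact pv_int_mod_div value i hi
  rw [← hI, Int.toNat_natCast]

theorem pv_main (value : Int) : to_64x_string value = to_64x_string_alt value := by
  unfold to_64x_string to_64x_string_alt
  rw [pv_A_loop]
  simp only [List.append_nil]
  set m := (PySem.Int.band value 0xFFFFFFFFFFFFFFFF).toNat with hm
  have hmlt : m < 16^16 := by
    have := pv_band_mask value
    have h0 : 0 ≤ value % 18446744073709551616 := Int.emod_nonneg value (by norm_num)
    have h1 : value % 18446744073709551616 < 18446744073709551616 :=
      Int.emod_lt_of_pos value (by norm_num)
    rw [hm, this]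
    omega
  rw [pv_hex_pad 16 m hmlt]
  congr 1
  apply List.map_congr_left
  intro i hi
  have hi16 : i < 16 := by
    rw [List.mem_reverse, List.mem_range] at hi
    exact hi
  rw [pv_AChar_eq, pv_m_digit value i hi16]
  congr 2
  rw [Int.shiftRight_eq_div_pow]
  congr 2
  rw [pow_mul]
  norm_num

-- ===== VERDICT (by name: the statement is the Claim_ definition above) =====
theorem to_64x_string_spec : Claim_equal_to_64x_string := by
  intro value _
  exact pv_main value
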